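-- pv_equiv track=rewrite | github.com/dhaase-de/dh-python-dh | dh/image/__init__.py | tcommon
-- ===== SOURCE A (Python) =====
-- def tcommon(dtypes):
--     """
--     For a given vector `dtypes` of types, returns the type which supports
--     all ranges.
--
--     >>> tcommon(['bool', 'uint8', 'uint16'])
--     'uint16'
--     >>> tcommon(['uint8', 'bool'])
--     'uint8'
--     >>> tcommon(['uint8', 'uint8'])
--     'uint8'
--     >>> tcommon(['uint8', 'uint16'])
--     'uint16'
--     >>> tcommon(['uint8', 'float'])
--     'float'
--     """
--
--     hierarchy = ("bool", "uint8", "uint16", "float")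
--     maxIndex = 0
--     for dtype in dtypes:
--         try:
--             index = hierarchy.index(dtype)
--         except ValueError:
--             raise RuntimeError("Invalid image type '{dtype}'".format(dtype=dtype))
--         maxIndex = max(maxIndex, index)
--
--     return hierarchy[maxIndex]
-- ===== SOURCE B (Python) =====
-- def tcommon(dtypes):
--     hierarchy = ("bool", "uint8", "uint16", "float")
--     present = set()
--     for dtype in dtypes:
--         if dtype not in hierarchy:
--             raise RuntimeError("Invalid image type '{dtype}'".format(dtype=dtype))
--         present.add(dtype)
--     for dtype in reversed(hierarchy):
--         if dtype in present:
--             return dtype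
--     return hierarchy[0]
-- ===== Notes on version B (the rewrite author's own statement) =====
-- stated objective: alternative
-- what changed: Replaces the input-scanning max-of-indices reduction with a validate-and-collect set pass followed by a highest-to-lowest scan of the fixed hierarchy, returning the first rank present.
import Mathlib
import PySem

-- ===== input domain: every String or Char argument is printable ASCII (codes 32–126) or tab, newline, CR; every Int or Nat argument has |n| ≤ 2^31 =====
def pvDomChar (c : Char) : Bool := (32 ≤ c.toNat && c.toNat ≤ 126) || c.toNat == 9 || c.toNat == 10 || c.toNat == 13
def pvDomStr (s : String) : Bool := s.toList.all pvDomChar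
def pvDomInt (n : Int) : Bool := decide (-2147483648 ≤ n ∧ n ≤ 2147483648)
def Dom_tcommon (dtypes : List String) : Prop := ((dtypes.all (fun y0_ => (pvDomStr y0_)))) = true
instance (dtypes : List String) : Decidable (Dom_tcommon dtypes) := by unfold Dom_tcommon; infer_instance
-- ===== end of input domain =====

-- B replaces A's max-of-indices reduction over the input by a validate-and-collect set
-- pass followed by a highest-to-lowest scan of the fixed hierarchy (alternative decomposition).

-- the fixed hierarchy tuple of both programs
def pvHier : List String := ["bool", "uint8", "uint16", "float"]

-- ===== PORT A =====
-- A: maxIndex = max over hierarchy.index(dtype); return hierarchy[maxIndex].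
-- Under Pre_ every index? lookup succeeds (A raises RuntimeError otherwise), so the
-- '.getD 0' / '.getD ""' defaults are never taken on admitted inputs.
def tcommon (dtypes : List String) : String :=
  let maxIndex := dtypes.foldl (fun m d => max m ((PySem.List.index? pvHier d).getD 0)) 0
  pvHier.getD maxIndex ""

-- ===== PORT B =====
-- B: collect the (validated) dtypes into a set, then scan the hierarchy from highest
-- rank to lowest and return the first one present; default 'bool' for empty input.
def tcommon_alt (dtypes : List String) : String :=
  let present : PySem.Set String := dtypes.foldl PySem.Set.add PySem.Set.empty
  match pvHier.reverse.find? (fun d => d ∈ present) with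
  | some d => d
  | none => "bool"

-- ===== PRECONDITION & SPEC =====
-- Pre_ excludes exactly the inputs containing a dtype outside the hierarchy, on which A raises RuntimeError.
def Pre_tcommon (dtypes : List String) : Prop := ∀ d ∈ dtypes, d ∈ pvHier
instance (dtypes : List String) : Decidable (Pre_tcommon dtypes) := by unfold Pre_tcommon; infer_instance
def pvWitness_tcommon : List String := ["uint8", "bool", "uint16"]
def Spec_tcommon (dtypes : List String) (out : String) : Prop := out = tcommon_alt dtypes
instance (dtypes : List String) (out : String) : Decidable (Spec_tcommon dtypes out) := by unfold Spec_tcommon; infer_instance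

-- ===== CLAIM (what is proved, stated in full; the proofs are below) =====
def Claim_equal_tcommon : Prop := ∀ (dtypes : List String), Dom_tcommon dtypes → Pre_tcommon dtypes → Spec_tcommon dtypes (tcommon dtypes)

-- ===== LEMMAS AND PROOFS =====

-- the common simple characterisation both ports reduce to
def pvBest (l : List String) : String :=
  if "float" ∈ l then "float"
  else if "uint16" ∈ l then "uint16"
  else if "uint8" ∈ l then "uint8"
  else "bool"

def pvRank (d : String) : Nat :=
  if d = "float" then 3 else if d = "uint16" then 2 else if d = "uint8" then 1 else 0

def pvSup (l : List String) : Nat := l.foldr (fun d m => max (pvRank d) m) 0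

lemma index?_eq_rank (d : String) (hd : d ∈ pvHier) :
    (PySem.List.index? pvHier d).getD 0 = pvRank d := by
  simp only [pvHier, List.mem_cons, List.not_mem_nil, or_false] at hd
  rcases hd with h | h | h | h <;> subst h <;> decide

lemma foldl_eq_sup (l : List String) (a : Nat) (h : ∀ d ∈ l, d ∈ pvHier) :
    l.foldl (fun m d => max m ((PySem.List.index? pvHier d).getD 0)) a = max a (pvSup l) := by
  induction l generalizing a with
  | nil => simp [pvSup]
  | cons d l ih =>
    simp only [List.foldl_cons, pvSup, List.foldr_cons]
    rw [ih _ (fun x hx => h x (List.mem_cons_of_mem _ hx)),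
        index?_eq_rank d (h d (List.mem_cons_self ..))]
    have : pvSup l = l.foldr (fun d m => max (pvRank d) m) 0 := rfl
    omega

lemma sup_eq (l : List String) (h : ∀ d ∈ l, d ∈ pvHier) :
    pvSup l = (if "float" ∈ l then 3 else if "uint16" ∈ l then 2
               else if "uint8" ∈ l then 1 else 0) := by
  induction l with
  | nil => simp [pvSup]
  | cons d l ih =>
    have hd := h d (List.mem_cons_self ..)
    have ihl := ih (fun x hx => h x (List.mem_cons_of_mem _ hx))
    have hstep : pvSup (d :: l) = max (pvRank d) (pvSup l) := rfl
    simp only [pvHier, List.mem_cons, List.not_mem_nil, or_false] at hd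
    rcases hd with h1 | h1 | h1 | h1 <;> subst h1 <;>
      rw [hstep, ihl] <;> simp [pvRank, List.mem_cons] <;> split_ifs <;> simp_all

lemma tcommon_eq_best (l : List String) (h : ∀ d ∈ l, d ∈ pvHier) :
    tcommon l = pvBest l := by
  unfold tcommon pvBest
  rw [foldl_eq_sup l 0 h, Nat.max_eq_right (Nat.zero_le _), sup_eq l h]
  split_ifs <;> rfl

lemma mem_present (l : List String) (d : String) :
    (d ∈ l.foldl PySem.Set.add PySem.Set.empty) ↔ d ∈ l := by
  rw [show (PySem.Set.empty : PySem.Set String) = ([] : List String) from rfl, ← PySem.Set.ofList_eq_foldl]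
  exact PySem.Set.mem_ofList (xs := l) (y := d)

lemma tcommon_alt_eq_best (l : List String) : tcommon_alt l = pvBest l := by
  unfold tcommon_alt pvBest
  simp only [pvHier, List.reverse_cons, List.reverse_nil, List.nil_append, List.cons_append,
    List.find?, mem_present]
  by_cases h3 : "float" ∈ l <;> by_cases h2 : "uint16" ∈ l <;>
    by_cases h1 : "uint8" ∈ l <;> by_cases h0 : "bool" ∈ l <;>
    simp [h3, h2, h1, h0]

-- ===== VERDICT (by name: the statement is the Claim_ definition above) =====
theorem tcommon_spec : Claim_equal_tcommon := by
  intro dtypes _ hpre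
  unfold Spec_tcommon
  rw [tcommon_eq_best dtypes hpre, tcommon_alt_eq_best dtypes]
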